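-- pv_equiv track=rewrite | github.com/hoangngoclam298/Tich_hop_du_lieu | Pre_process/pre_proc_nhadat24h.py | split_text_price
-- ===== SOURCE A (Python) =====
-- def split_text_price(text):
--     list_text = text.split(' ')
--     result = []
--     for text in list_text:
--         start = 0
--         for i in range(1, len(text)):
--             if((text[i-1].isdigit() and text[i].isalpha()) or (text[i].isdigit() and text[i-1].isalpha())):
--                 result.append(text[start:i])
--                 start = i
--         result.append(text[start:])
--     return result
-- ===== SOURCE B (Python) =====
-- def split_text_price(text):
--     # One pass over the raw characters: a space flushes the current piece,
--     # a digit<->letter boundary against the piece's last char flushes and restarts it.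
--     result = []
--     piece = []
--     for c in text:
--         if c == ' ':
--             result.append(''.join(piece))
--             piece = []
--         elif piece and ((piece[-1].isdigit() and c.isalpha())
--                         or (c.isdigit() and piece[-1].isalpha())):
--             result.append(''.join(piece))
--             piece = [c]
--         else:
--             piece.append(c)
--     result.append(''.join(piece))
--     return result
-- ===== Notes on version B (the rewrite author's own statement) =====
-- stated objective: alternative
-- what changed: A splits on spaces first and runs an index-based inner loop per token that slices the token between remembered start positions; B never splits or indexes: it makes one character-level pass over the raw string with a growing piece accumulator, flushing the piece on a space or on a digit/letter boundary against the piece's last character.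
import Mathlib
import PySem

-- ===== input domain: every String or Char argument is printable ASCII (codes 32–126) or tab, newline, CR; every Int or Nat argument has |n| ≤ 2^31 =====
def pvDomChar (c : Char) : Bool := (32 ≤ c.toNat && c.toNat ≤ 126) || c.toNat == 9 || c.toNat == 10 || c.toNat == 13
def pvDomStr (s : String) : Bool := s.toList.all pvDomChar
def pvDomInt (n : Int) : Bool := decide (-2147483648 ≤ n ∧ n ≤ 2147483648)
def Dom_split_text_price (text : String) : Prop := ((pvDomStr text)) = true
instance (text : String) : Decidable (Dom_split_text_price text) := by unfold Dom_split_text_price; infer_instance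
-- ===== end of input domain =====

-- B replaces A's split-then-indexed-inner-loop by a single character-level pass over the
-- raw string with a piece accumulator (flush on space or digit/letter boundary); objective: alternative.

-- ===== PORT A =====
-- A's inner loop step: running state is (start, result); i comes from range(1, len(tok)).
def pvStepA (tok : List Char) (st : Int × List (List Char)) (i : Int) : Int × List (List Char) :=
  if (PySem.Chars.isdigit (PySem.List.pyGetD tok (i - 1) ' ') &&
        PySem.Chars.isalpha (PySem.List.pyGetD tok i ' ')) ||
     (PySem.Chars.isdigit (PySem.List.pyGetD tok i ' ') &&
        PySem.Chars.isalpha (PySem.List.pyGetD tok (i - 1) ' ')) then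
    (i, st.2 ++ [PySem.List.slice tok (some st.1) (some i)])
  else st

-- one iteration of A's outer 'for text in list_text' loop, threading the shared result list
def pvTokA (res : List (List Char)) (tok : List Char) : List (List Char) :=
  let st := (PySem.List.pyRange 1 (tok.length : Int) 1).foldl (pvStepA tok) ((0 : Int), res)
  st.2 ++ [PySem.List.slice tok (some st.1) none]

def split_text_price (text : String) : List String :=
  let list_text := PySem.Chars.splitOn text.toList [' ']
  (list_text.foldl pvTokA []).map String.ofList

-- ===== PORT B =====
-- the digit/letter boundary predicate of Source B, on two adjacent characters
def pvB (x y : Char) : Bool :=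
  (PySem.Chars.isdigit x && PySem.Chars.isalpha y) ||
  (PySem.Chars.isdigit y && PySem.Chars.isalpha x)

-- Source B's loop body: state is (result, piece); flush on ' ', flush-and-restart on a boundary
def pvStepB (st : List (List Char) × List Char) (c : Char) : List (List Char) × List Char :=
  if c = ' ' then (st.1 ++ [st.2], [])
  else if (!st.2.isEmpty) && pvB st.2.getLast! c then (st.1 ++ [st.2], [c])
  else (st.1, st.2 ++ [c])

def split_text_price_alt (text : String) : List String :=
  let st := text.toList.foldl pvStepB ([], [])
  (st.1 ++ [st.2]).map String.ofList

-- ===== PRECONDITION & SPEC =====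
def Spec_split_text_price (text : String) (out : List String) : Prop := out = split_text_price_alt text
instance (text : String) (out : List String) : Decidable (Spec_split_text_price text out) := by unfold Spec_split_text_price; infer_instance

-- ===== CLAIM =====
def Claim_equal_split_text_price : Prop := ∀ (text : String), Dom_split_text_price text → Spec_split_text_price text (split_text_price text)

-- ===== LEMMAS AND PROOFS =====

def pvSplitRef (pre : List Char) : List Char → List (List Char)
  | [] => [pre]
  | c :: r => if c = ' ' then pre :: pvSplitRef [] r else pvSplitRef (pre ++ [c]) r

lemma pvGoSpec : ∀ (fuel : Nat) (l cur : List Char) (acc : List (List Char)),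
    l.length < fuel →
    PySem.Chars.splitOn.go [' '] fuel l cur acc = acc.reverse ++ pvSplitRef cur.reverse l := by
  intro fuel
  induction fuel with
  | zero => intro l cur acc h; omega
  | succ fuel ih =>
    intro l cur acc h
    cases l with
    | nil => simp [PySem.Chars.splitOn.go, pvSplitRef]
    | cons c r =>
      by_cases hc : c = ' '
      · subst hc
        rw [PySem.Chars.splitOn.go]
        have hp : [' '].isPrefixOf (' ' :: r) = true := by simp [List.isPrefixOf]
        rw [if_pos hp]
        simp only [List.length_cons, List.length_nil, List.drop_succ_cons, List.drop_zero]
        rw [ih r [] ((List.reverse cur) :: acc) (by simp at h ⊢; omega)]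
        simp [pvSplitRef]
      · rw [PySem.Chars.splitOn.go]
        have hp : [' '].isPrefixOf (c :: r) = false := by
          simp [List.isPrefixOf]; exact fun hcc => absurd hcc.symm hc
        rw [if_neg (by simp [hp])]
        rw [ih r (c :: cur) acc (by simp at h ⊢; omega)]
        simp [pvSplitRef, hc]

lemma pvSplitOn_eq (l : List Char) : PySem.Chars.splitOn l [' '] = pvSplitRef [] l := by
  unfold PySem.Chars.splitOn
  rw [pvGoSpec _ _ _ _ (by omega)]
  simp

lemma pvSplitRef_noSpace {l : List Char} (h : ' ' ∉ l) (pre : List Char) :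
    pvSplitRef pre l = [pre ++ l] := by
  induction l generalizing pre with
  | nil => simp [pvSplitRef]
  | cons c r ih =>
    simp only [List.mem_cons, not_or] at h
    simp [pvSplitRef, Ne.symm h.1, ih h.2]

lemma pvSplitRef_append {t : List Char} (h : ' ' ∉ t) (pre rest : List Char) :
    pvSplitRef pre (t ++ ' ' :: rest) = (pre ++ t) :: pvSplitRef [] rest := by
  induction t generalizing pre with
  | nil => simp [pvSplitRef]
  | cons c r ih =>
    simp only [List.mem_cons, not_or] at h
    simp [pvSplitRef, Ne.symm h.1, ih h.2]

def pvPcs (p : List Char) : List Char → List (List Char)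
  | [] => [p]
  | c :: r => if (!p.isEmpty) && pvB p.getLast! c then p :: pvPcs [c] r else pvPcs (p ++ [c]) r

lemma pvScanTok {tok : List Char} (h : ' ' ∉ tok) :
    ∀ (res : List (List Char)) (p : List Char),
      (tok.foldl pvStepB (res, p)).1 ++ [(tok.foldl pvStepB (res, p)).2] = res ++ pvPcs p tok := by
  induction tok with
  | nil => intro res p; simp [pvPcs]
  | cons c r ih =>
    intro res p
    simp only [List.mem_cons, not_or] at h
    simp only [List.foldl_cons]
    by_cases hb : ((!p.isEmpty) && pvB p.getLast! c) = true
    · have e1 : pvStepB (res, p) c = (res ++ [p], [c]) := by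
        unfold pvStepB; rw [if_neg (Ne.symm h.1), if_pos hb]
      rw [e1, ih h.2, pvPcs, if_pos hb, List.append_assoc, List.singleton_append]
    · have e1 : pvStepB (res, p) c = (res, p ++ [c]) := by
        unfold pvStepB; rw [if_neg (Ne.symm h.1), if_neg hb]
      rw [e1, ih h.2, pvPcs, if_neg hb]

lemma pvPieceLast (tok : List Char) (s a : Nat) (hs : s < a) (ha : a ≤ tok.length) :
    ((tok.drop s).take (a - s)).getLast! = tok.getD (a - 1) ' ' := by
  have hlen : ((tok.drop s).take (a - s)).length = a - s := by
    simp [List.length_take, List.length_drop]; omega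
  rw [List.getLast!_eq_getLast?_getD, List.getLast?_eq_getElem?, hlen]
  rw [List.getElem?_take, List.getElem?_drop]
  simp only [if_pos (by omega : a - s - 1 < a - s)]
  rw [show s + (a - s - 1) = a - 1 from by omega]
  rw [List.getD_eq_getElem?_getD, List.getElem?_eq_getElem (by omega)]
  simp

lemma pvPieceNE (tok : List Char) (s a : Nat) (hs : s < a) (ha : a ≤ tok.length) :
    ((tok.drop s).take (a - s)).isEmpty = false := by
  rw [List.isEmpty_eq_false_iff, ← List.length_pos_iff]
  simp [List.length_take, List.length_drop]; omega

lemma pvLoopA (tok : List Char) : ∀ (k a s : Nat) (res : List (List Char)),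
    a + k = tok.length → 1 ≤ a → s < a →
    (let st := (PySem.List.pyRange (a : Int) (tok.length : Int) 1).foldl (pvStepA tok) (((s : Nat) : Int), res);
     st.2 ++ [PySem.List.slice tok (some st.1) none]) =
    res ++ pvPcs ((tok.drop s).take (a - s)) (tok.drop a) := by
  intro k
  induction k with
  | zero =>
    intro a s res hk _ hs
    have ha : a = tok.length := by omega
    subst ha
    rw [PySem.List.pyRange_one_eq_nil (le_refl _)]
    simp only [List.foldl_nil]
    rw [PySem.List.slice_from tok (Int.natCast_nonneg s)]
    have ht : (tok.drop s).take (tok.length - s) = tok.drop s := List.take_of_length_le (by simp)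
    simp [ht, pvPcs]
  | succ k ih =>
    intro a s res hk ha1 hs
    have haL : a < tok.length := by omega
    have hlt : (a : Int) < (tok.length : Int) := by exact_mod_cast haL
    rw [PySem.List.pyRange_one_cons hlt]
    simp only [List.foldl_cons]
    have hgy : PySem.List.pyGetD tok ((a : Int)) ' ' = tok.getD a ' ' := by
      exact_mod_cast PySem.List.pyGetD_natCast tok a ' '
    have hgx : PySem.List.pyGetD tok ((a : Int) - 1) ' ' = tok.getD (a - 1) ' ' := by
      have : ((a : Int) - 1) = ((a - 1 : Nat) : Int) := by omega
      rw [this]; exact_mod_cast PySem.List.pyGetD_natCast tok (a - 1) ' '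
    -- the pcs side: expose the next character
    rw [List.drop_eq_getElem_cons haL]
    have hcond : ((!((tok.drop s).take (a - s)).isEmpty) &&
        pvB ((tok.drop s).take (a - s)).getLast! tok[a]) =
        ((PySem.Chars.isdigit (tok.getD (a-1) ' ') && PySem.Chars.isalpha (tok.getD a ' ')) ||
         (PySem.Chars.isdigit (tok.getD a ' ') && PySem.Chars.isalpha (tok.getD (a-1) ' '))) := by
      rw [pvPieceNE tok s a hs (by omega), pvPieceLast tok s a hs (by omega)]
      rw [List.getD_eq_getElem tok ' ' haL]
      simp [pvB]
    by_cases hb : ((PySem.Chars.isdigit (tok.getD (a-1) ' ') && PySem.Chars.isalpha (tok.getD a ' ')) ||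
         (PySem.Chars.isdigit (tok.getD a ' ') && PySem.Chars.isalpha (tok.getD (a-1) ' '))) = true
    · have hstep : pvStepA tok (((s:Nat):Int), res) (a : Int) =
          ((a : Int), res ++ [(tok.drop s).take (a - s)]) := by
        unfold pvStepA
        rw [hgx, hgy, if_pos hb]
        rw [PySem.List.slice_toNat tok (Int.natCast_nonneg s) (Int.natCast_nonneg a)]
        simp
      rw [hstep]
      have h2 := ih (a + 1) a (res ++ [(tok.drop s).take (a - s)]) (by omega) (by omega) (by omega)
      push_cast at h2 ⊢
      rw [h2]
      rw [pvPcs, if_pos (hcond ▸ hb)]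
      have h1 : (tok.drop a).take (a + 1 - a) = [tok[a]] := by
        rw [show a + 1 - a = 1 from by omega, List.take_one, List.head?_drop,
          List.getElem?_eq_getElem haL]
        rfl
      rw [h1, List.append_assoc, List.singleton_append]
    · have hstep : pvStepA tok (((s:Nat):Int), res) (a : Int) = (((s:Nat):Int), res) := by
        unfold pvStepA
        rw [hgx, hgy, if_neg hb]
      rw [hstep]
      have h2 := ih (a + 1) s res (by omega) (by omega) (by omega)
      push_cast at h2 ⊢
      rw [h2]
      rw [pvPcs, if_neg (by rw [hcond]; exact hb)]
      have h1 : (tok.drop s).take (a + 1 - s) = (tok.drop s).take (a - s) ++ [tok[a]] := by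
        rw [show a + 1 - s = (a - s) + 1 from by omega, List.take_add_one]
        rw [List.getElem?_drop, List.getElem?_eq_getElem (by omega : s + (a - s) < tok.length)]
        simp [show s + (a - s) = a from by omega]
      rw [h1]

lemma pvTokA_pcs (res : List (List Char)) (tok : List Char) :
    pvTokA res tok = res ++ pvPcs [] tok := by
  cases tok with
  | nil =>
    simp [pvTokA, PySem.List.pyRange_one_eq_nil, PySem.List.slice, pvPcs]
  | cons c r =>
    have h := pvLoopA (c :: r) r.length 1 0 res (by simp [Nat.add_comm]) (le_refl _) Nat.zero_lt_one
    unfold pvTokA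
    simpa [pvPcs] using h

lemma pvStepB_space (st : List (List Char) × List Char) : pvStepB st ' ' = (st.1 ++ [st.2], []) := by
  unfold pvStepB
  rw [if_pos rfl]

lemma pvMainAux : ∀ (n : Nat) (l : List Char), l.length = n → ∀ (res : List (List Char)),
    (l.foldl pvStepB (res, [])).1 ++ [(l.foldl pvStepB (res, [])).2] =
    (PySem.Chars.splitOn l [' ']).foldl pvTokA res := by
  intro n
  induction n using Nat.strong_induction_on with
  | _ n ih =>
    intro l hn res
    rw [pvSplitOn_eq]
    have hsp : ' ' ∉ l.takeWhile (fun c => c ≠ ' ') := by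
      intro hm
      have := List.mem_takeWhile_imp hm
      simp at this
    by_cases hd : l.dropWhile (fun c => c ≠ ' ') = []
    · have hl : l.takeWhile (fun c => c ≠ ' ') = l := by
        conv_rhs => rw [← List.takeWhile_append_dropWhile (p := fun c => c ≠ ' ') (l := l)]
        rw [hd, List.append_nil]
      rw [hl] at hsp
      rw [pvSplitRef_noSpace hsp, List.foldl_cons, List.foldl_nil, pvTokA_pcs, List.nil_append]
      exact pvScanTok hsp res []
    · -- l = t ++ ' ' :: rest
      set t := l.takeWhile (fun c => c ≠ ' ') with ht
      set d := l.dropWhile (fun c => c ≠ ' ') with hdd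
      have hhead : d.head hd = ' ' := by
        have h0 : (decide (d.head hd ≠ ' ')) = false := List.head_dropWhile_not _ hd
        simpa using h0
      have hldecomp : l = t ++ ' ' :: d.tail := by
        conv_lhs => rw [← List.takeWhile_append_dropWhile (p := fun c => c ≠ ' ') (l := l)]
        rw [← ht, ← hdd]
        congr 1
        rw [← hhead]
        exact (List.cons_head_tail hd).symm
      have hdpos : 0 < d.length := List.length_pos_iff.mpr hd
      have hlen : l.length = t.length + 1 + d.tail.length := by
        conv_lhs => rw [hldecomp]
        simp
        omega
      have hstep : pvStepB (t.foldl pvStepB (res, [])) ' ' = (pvTokA res t, []) := by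
        rw [pvStepB_space, pvScanTok hsp res [], ← pvTokA_pcs]
      have hih := ih d.tail.length (by omega) d.tail rfl (pvTokA res t)
      rw [pvSplitOn_eq] at hih
      rw [hldecomp, pvSplitRef_append hsp, List.nil_append, List.foldl_cons]
      rw [List.foldl_append, List.foldl_cons, hstep, hih]

lemma pvMain : ∀ (l : List Char) (res : List (List Char)),
    (let st := l.foldl pvStepB (res, []); st.1 ++ [st.2]) =
    (PySem.Chars.splitOn l [' ']).foldl pvTokA res := by
  intro l res
  exact pvMainAux l.length l rfl res

-- ===== VERDICT =====
theorem split_text_price_spec : Claim_equal_split_text_price := by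
  intro text _
  show (((PySem.Chars.splitOn text.toList [' ']).foldl pvTokA []).map String.ofList) = split_text_price_alt text
  unfold split_text_price_alt
  rw [← pvMain]
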